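-- pv_equiv track=rewrite | github.com/mattiudica/hackatonbb | platforms/netflix.py | get_position
-- ===== SOURCE A (Python) =====
-- def get_position(top_position):
--     positional_value = 0
--     real_value = 1
--     while True:
--         if top_position == positional_value:
--             top_position = real_value
--             break
--         else:
--             positional_value += 1
--             real_value += 1
--
--     return top_position
-- ===== SOURCE B (Python) =====
-- def get_position(top_position):
--     return top_position + 1
-- ===== Notes on version B (the rewrite author's own statement) =====
-- stated objective: faster
-- what changed: Replaced the counting while-loop (incrementing two counters until the counter reaches top_position) by the closed form top_position + 1.
import Mathlib
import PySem

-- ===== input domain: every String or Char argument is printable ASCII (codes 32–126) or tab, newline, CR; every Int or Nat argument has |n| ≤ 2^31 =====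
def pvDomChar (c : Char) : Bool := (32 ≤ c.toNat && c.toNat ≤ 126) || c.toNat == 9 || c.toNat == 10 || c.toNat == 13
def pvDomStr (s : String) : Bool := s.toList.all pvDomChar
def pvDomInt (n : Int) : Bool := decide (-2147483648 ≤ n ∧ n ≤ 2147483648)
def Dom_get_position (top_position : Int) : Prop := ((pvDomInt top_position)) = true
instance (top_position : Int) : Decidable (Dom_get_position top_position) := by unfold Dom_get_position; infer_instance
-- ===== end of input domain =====

-- B replaces A's counting loop by the closed form top_position + 1 (O(1) vs O(n)).

-- ===== PORT A =====
-- A's `while True` loop with counters positional_value/real_value; fuel = top_position.toNat + 1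
-- suffices for every input on which the Python loop terminates (top_position ≥ 0).
def gpLoop (t : Int) : Nat → Int → Int → Int
  | 0, _, rv => rv
  | n + 1, pv, rv => if t == pv then rv else gpLoop t n (pv + 1) (rv + 1)

def get_position (top_position : Int) : Int :=
  gpLoop top_position (top_position.toNat + 1) 0 1

-- ===== PORT B =====
def get_position_alt (top_position : Int) : Int := top_position + 1

-- ===== PRECONDITION & SPEC =====
-- A's loop never terminates for negative top_position (Python diverges there), so Pre_ excludes negatives.
def Pre_get_position (top_position : Int) : Prop := 0 ≤ top_position
instance (top_position : Int) : Decidable (Pre_get_position top_position) := by unfold Pre_get_position; infer_instance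
def pvWitness_get_position : Int := (3)

def Spec_get_position (top_position : Int) (out : Int) : Prop := out = get_position_alt top_position
instance (top_position : Int) (out : Int) : Decidable (Spec_get_position top_position out) := by unfold Spec_get_position; infer_instance

-- ===== CLAIM (what is proved, stated in full; the proofs are below) =====
def Claim_equal_get_position : Prop := ∀ (top_position : Int), Dom_get_position top_position → Pre_get_position top_position → Spec_get_position top_position (get_position top_position)

-- ===== LEMMAS AND PROOFS =====
theorem gpLoop_eq (t : Int) (n : Nat) : ∀ (pv rv : Int), t = pv + n → gpLoop t (n + 1) pv rv = rv + n := by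
  induction n with
  | zero =>
    intro pv rv h
    have hpv : t = pv := by omega
    simp [gpLoop, hpv]
  | succ m ih =>
    intro pv rv h
    have hne : (t == pv) = false := by simp; omega
    have hstep : gpLoop t (m + 1 + 1) pv rv
        = gpLoop t (m + 1) (pv + 1) (rv + 1) := by
      rw [gpLoop, hne]; simp
    rw [hstep, ih (pv + 1) (rv + 1) (by push_cast at h ⊢; omega)]
    push_cast; ring

-- ===== VERDICT (by name: the statement is the Claim_ definition above) =====
theorem get_position_spec : Claim_equal_get_position := by
  intro t _ hpre
  unfold Pre_get_position at hpre
  unfold Spec_get_position get_position get_position_alt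
  have h : t = 0 + (t.toNat : Int) := by omega
  rw [gpLoop_eq t t.toNat 0 1 h]
  omega
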